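-- pv_equiv track=rewrite | github.com/lingpy/lingrex | lingrex/cpr.py | consensus_pattern
-- ===== SOURCE A (Python) =====
-- def consensus_pattern(patterns, missing="Ø"):
--     """Return consensus pattern of multiple patterns.
--
--     Parameters
--     ----------
--     patterns : list
--         List of patterns (each pattern should be a sequence, preferably a
--         list).
--     gap : str (default="Ø")
--         A gap in the sense of "missing data", that is, a cognate set for which
--         a value in a given language is absent.
--
--     Returns
--     -------
--     consensus : list
--         A one-dimensional list.
--
--     Note
--     ----
--     This consensus method raises an error if the patterns contain incompatible
--     columns (non-identical values apart from the gap character in the same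
--     column).
--     """
--     out = []
--     for i in range(len(patterns[0])):
--         col = [line[i] for line in patterns]
--         no_gaps = [x for x in col if x != missing]
--         if len(set(no_gaps)) > 1:
--             raise ValueError("Your patterns are incompatible")
--         out += [no_gaps[0] if no_gaps else missing]
--     return out
-- ===== SOURCE B (Python) =====
-- def _merge(o, v, missing):
--     if o == missing:
--         return v
--     if v == missing or v == o:
--         return o
--     raise ValueError("Your patterns are incompatible")
--
--
-- def consensus_pattern(patterns, missing="Ø"):
--     out = [missing] * len(patterns[0])
--     for line in patterns:
--         out = [_merge(o, line[i], missing) for i, o in enumerate(out)]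
--     return out
-- ===== Notes on version B (the rewrite author's own statement) =====
-- stated objective: alternative
-- what changed: Replaces the column-gathering pass (build each column, filter gaps, check set size) by a row-major fold that merges each line into a running consensus accumulator, raising on the first conflicting merge.
import Mathlib
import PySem

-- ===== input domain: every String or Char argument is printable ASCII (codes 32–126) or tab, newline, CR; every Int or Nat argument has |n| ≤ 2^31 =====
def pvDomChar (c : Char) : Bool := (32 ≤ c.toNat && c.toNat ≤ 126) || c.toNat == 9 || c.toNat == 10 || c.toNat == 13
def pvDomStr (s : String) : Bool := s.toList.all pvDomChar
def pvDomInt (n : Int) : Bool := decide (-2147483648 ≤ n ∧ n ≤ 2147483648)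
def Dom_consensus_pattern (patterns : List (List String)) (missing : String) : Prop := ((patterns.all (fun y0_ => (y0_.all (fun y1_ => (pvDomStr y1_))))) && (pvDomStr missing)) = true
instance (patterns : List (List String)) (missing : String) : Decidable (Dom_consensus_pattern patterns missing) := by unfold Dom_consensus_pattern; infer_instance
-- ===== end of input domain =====

-- B replaces A's column-gathering pass by a row-major fold merging each line into a running
-- consensus accumulator (objective: alternative decomposition; same return value on Pre_).

-- ===== PORT A =====
-- none = the raise (ValueError on a conflicting column, IndexError on a short/absent row)
def consensus_patternLoop (patterns : List (List String)) (missing : String) :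
    List Int → List String → Option (List String)
  | [], out => some out
  | i :: is, out =>
    match patterns.mapM (fun line => PySem.List.pyGet? line i) with
    | none => none
    | some col =>
      let no_gaps := col.filter (fun x => x != missing)
      if 1 < (PySem.Set.ofList no_gaps).length then none
      else consensus_patternLoop patterns missing is (out ++ [no_gaps.headD missing])

def consensus_pattern (patterns : List (List String)) (missing : String) : List String :=
  (match PySem.List.pyGet? patterns 0 with
   | none => none
   | some p0 =>
     consensus_patternLoop patterns missing (PySem.List.pyRange 0 (Int.ofNat p0.length) 1) []).getD []

-- ===== PORT B =====
-- _merge(o, v, missing); none = the ValueError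
def pvMerge (missing o v : String) : Option String :=
  if o = missing then some v
  else if v = missing ∨ v = o then some o
  else none

-- [_merge(o, line[i], missing) for i, o in enumerate(out)]
def consensus_patternRow (missing : String) (line out : List String) : Option (List String) :=
  (PySem.List.enumerate out).mapM (fun p =>
    match PySem.List.pyGet? line p.1 with
    | none => none
    | some v => pvMerge missing p.2 v)

def consensus_patternFold (missing : String) : List (List String) → List String → Option (List String)
  | [], out => some out
  | line :: rest, out =>
    match consensus_patternRow missing line out with
    | none => none
    | some out' => consensus_patternFold missing rest out'

def consensus_pattern_alt (patterns : List (List String)) (missing : String) : List String :=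
  (match PySem.List.pyGet? patterns 0 with
   | none => none
   | some p0 =>
     consensus_patternFold missing patterns (List.replicate p0.length missing)).getD []

-- ===== PRECONDITION & SPEC =====
-- Pre_ excludes exactly the inputs where A raises: empty pattern list (IndexError on patterns[0]),
-- a row shorter than the first row (IndexError on line[i]), or a column with two different
-- non-missing values (ValueError); B raises on exactly the same inputs.
def Pre_consensus_pattern (patterns : List (List String)) (missing : String) : Prop :=
  patterns ≠ [] ∧
  (∀ line ∈ patterns, (patterns.headD []).length ≤ line.length) ∧
  (∀ i < (patterns.headD []).length, ∀ l1 ∈ patterns, ∀ l2 ∈ patterns,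
    l1.getD i missing ≠ missing → l2.getD i missing ≠ missing →
    l1.getD i missing = l2.getD i missing)
instance (patterns : List (List String)) (missing : String) : Decidable (Pre_consensus_pattern patterns missing) := by
  unfold Pre_consensus_pattern; infer_instance

def pvWitness_consensus_pattern : List (List String) × String :=
  ([["a", "X", "b"], ["a", "c", "X"]], "X")

def Spec_consensus_pattern (patterns : List (List String)) (missing : String) (out : List String) : Prop := out = consensus_pattern_alt patterns missing
instance (patterns : List (List String)) (missing : String) (out : List String) : Decidable (Spec_consensus_pattern patterns missing out) := by unfold Spec_consensus_pattern; infer_instance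

-- ===== CLAIM (what is proved, stated in full; the proofs are below) =====
def Claim_equal_consensus_pattern : Prop := ∀ (patterns : List (List String)) (missing : String), Dom_consensus_pattern patterns missing → Pre_consensus_pattern patterns missing → Spec_consensus_pattern patterns missing (consensus_pattern patterns missing)

-- ===== LEMMAS AND PROOFS =====

-- consensus value of column k, reading rows top to bottom
def pvColv (patterns : List (List String)) (missing : String) (k : Nat) : String :=
  ((patterns.map (fun l => l.getD k missing)).filter (fun x => x != missing)).headD missing

theorem pv_dedup_len_le_one {xs : List String} (h : ∀ a ∈ xs, ∀ b ∈ xs, a = b) :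
    ¬ 1 < (PySem.Set.ofList xs).length := by
  intro hlt
  have hnd := PySem.Set.nodup_ofList (xs := xs)
  have h0 : (PySem.Set.ofList xs)[0] ∈ PySem.Set.ofList xs := List.getElem_mem (by omega)
  have h1 : (PySem.Set.ofList xs)[1] ∈ PySem.Set.ofList xs := List.getElem_mem (by omega)
  have hne : (PySem.Set.ofList xs)[0] ≠ (PySem.Set.ofList xs)[1] := by
    intro he
    have := (List.Nodup.getElem_inj_iff hnd).mp he
    omega
  exact hne (h _ ((PySem.Set.mem_ofList _ _).mp h0) _ ((PySem.Set.mem_ofList _ _).mp h1))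

theorem pv_mapM_col {missing : String} {i : Int} (h0 : 0 ≤ i) :
    ∀ (patterns : List (List String)), (∀ l ∈ patterns, i.toNat < l.length) →
    patterns.mapM (fun line => PySem.List.pyGet? line i)
      = some (patterns.map (fun l => l.getD i.toNat missing))
  | [], _ => by simp
  | l :: rest, h => by
    have hlt : i.toNat < l.length := h l (by simp)
    have h1 : PySem.List.pyGet? l i = some (l.getD i.toNat missing) := by
      rw [PySem.List.pyGet?_eq_some_getElem l h0 (by omega), List.getD_eq_getElem _ _ hlt]
    rw [List.mapM_cons, h1, pv_mapM_col h0 rest (fun l' hl' => h l' (List.mem_cons_of_mem _ hl'))]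
    rfl

theorem pv_loopA {patterns : List (List String)} {missing : String} :
    ∀ (is : List Int) (out : List String),
    (∀ i ∈ is, 0 ≤ i ∧ ∀ l ∈ patterns, i.toNat < l.length) →
    (∀ i ∈ is, ∀ l1 ∈ patterns, ∀ l2 ∈ patterns,
      l1.getD i.toNat missing ≠ missing → l2.getD i.toNat missing ≠ missing →
      l1.getD i.toNat missing = l2.getD i.toNat missing) →
    consensus_patternLoop patterns missing is out
      = some (out ++ is.map (fun i => pvColv patterns missing i.toNat))
  | [], out, _, _ => by simp [consensus_patternLoop]
  | i :: is, out, h1, h2 => by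
    obtain ⟨hi0, hilen⟩ := h1 i (by simp)
    rw [consensus_patternLoop, pv_mapM_col (missing := missing) hi0 patterns hilen]
    dsimp only
    have hall : ∀ a ∈ (patterns.map (fun l => l.getD i.toNat missing)).filter
        (fun x => x != missing), ∀ b ∈ (patterns.map (fun l => l.getD i.toNat missing)).filter
        (fun x => x != missing), a = b := by
      intro a ha b hb
      obtain ⟨ha1, ha2⟩ := List.mem_filter.mp ha
      obtain ⟨hb1, hb2⟩ := List.mem_filter.mp hb
      obtain ⟨la, hla, rfl⟩ := List.mem_map.mp ha1
      obtain ⟨lb, hlb, rfl⟩ := List.mem_map.mp hb1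
      exact h2 i (by simp) la hla lb hlb (by simpa using ha2) (by simpa using hb2)
    rw [if_neg (pv_dedup_len_le_one hall)]
    rw [pv_loopA is _ (fun j hj => h1 j (by simp [hj])) (fun j hj => h2 j (by simp [hj]))]
    simp [pvColv]

theorem pv_rowB_go {missing : String} {line : List String} :
    ∀ (out : List String) (s : Nat),
    s + out.length ≤ line.length →
    (∀ k < out.length, out.getD k missing ≠ missing → line.getD (s + k) missing ≠ missing →
      out.getD k missing = line.getD (s + k) missing) →
    (PySem.List.enumerate out (s : Int)).mapM (fun p =>
      match PySem.List.pyGet? line p.1 with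
      | none => none
      | some v => pvMerge missing p.2 v) = some
      ((List.range out.length).map (fun k =>
        if out.getD k missing = missing then line.getD (s + k) missing else out.getD k missing))
  | [], s, _, _ => by simp [PySem.List.enumerate_nil]
  | o :: rest, s, hlen, hc => by
    have hs : s < line.length := by simp at hlen; omega
    have hget : PySem.List.pyGet? line (s : Int) = some (line.getD s missing) := by
      rw [PySem.List.pyGet?_eq_some_getElem line (by omega) (by omega),
        List.getD_eq_getElem _ _ hs]
      simp
    have hmerge : pvMerge missing o (line.getD s missing)
        = some (if o = missing then line.getD s missing else o) := by
      by_cases ho : o = missing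
      · simp [pvMerge, ho]
      · rw [if_neg ho]
        by_cases hv : line.getD s missing = missing
        · rw [pvMerge, if_neg ho, if_pos (Or.inl hv)]
        · have h0 : o = line.getD s missing := by
            have := hc 0 (by simp) (by simpa using ho) (by simpa using hv)
            simpa using this
          rw [pvMerge, if_neg ho, if_pos (Or.inr h0.symm)]
    have hcast : (s : Int) + 1 = ((s + 1 : Nat) : Int) := by push_cast; ring
    rw [PySem.List.enumerate_cons, List.mapM_cons]
    simp only [hget, hmerge, hcast]
    rw [pv_rowB_go rest (s + 1) (by simp at hlen ⊢; omega)
      (fun k hk h1 h2 => by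
        have := hc (k + 1) (by simp; omega) (by simpa using h1)
          (by rw [show s + (k + 1) = s + 1 + k by omega]; exact h2)
        simpa [show s + (k + 1) = s + 1 + k by omega] using this)]
    simp only [Option.bind_eq_bind, Option.bind_some]
    congr 1
    rw [List.length_cons, List.range_succ_eq_map, List.map_cons, List.map_map]
    refine congrArg₂ List.cons (by simp) (List.map_congr_left ?_)
    intro a _
    have h1 : s + 1 + a = s + (a + 1) := by omega
    simp [h1]

theorem pv_rowB {missing : String} {line out : List String}
    (hlen : out.length ≤ line.length)
    (hc : ∀ k < out.length, out.getD k missing ≠ missing → line.getD k missing ≠ missing →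
      out.getD k missing = line.getD k missing) :
    consensus_patternRow missing line out = some
      ((List.range out.length).map (fun k =>
        if out.getD k missing = missing then line.getD k missing else out.getD k missing)) := by
  have := pv_rowB_go (line := line) out 0 (by omega) (by simpa using hc)
  simpa [consensus_patternRow] using this

theorem pv_foldB {missing : String} {n : Nat} :
    ∀ (rows : List (List String)) (out : List String),
    out.length = n →
    (∀ l ∈ rows, n ≤ l.length) →
    (∀ k < n, ∀ l ∈ rows, out.getD k missing ≠ missing → l.getD k missing ≠ missing →
      out.getD k missing = l.getD k missing) →
    (∀ k < n, ∀ l1 ∈ rows, ∀ l2 ∈ rows,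
      l1.getD k missing ≠ missing → l2.getD k missing ≠ missing →
      l1.getD k missing = l2.getD k missing) →
    consensus_patternFold missing rows out = some
      ((List.range n).map (fun k =>
        if out.getD k missing = missing then pvColv rows missing k else out.getD k missing))
  | [], out, hn, _, _, _ => by
    rw [consensus_patternFold]
    congr 1
    subst hn
    apply List.ext_getElem (by simp)
    intro k hk1 hk2
    simp only [List.getElem_map, List.getElem_range]
    rw [List.getD_eq_getElem _ _ hk1]
    split_ifs with h
    · simp [pvColv, h]
    · rfl
  | line :: rest, out, hn, hrl, hco, hcc => by
    rw [consensus_patternFold]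
    have hrow := pv_rowB (missing := missing) (line := line) (out := out)
      (by rw [hn]; exact hrl line (by simp))
      (fun k hk => hco k (by omega) line (by simp))
    rw [hrow]
    dsimp only
    set out' := (List.range out.length).map (fun k =>
        if out.getD k missing = missing then line.getD k missing else out.getD k missing) with hout'
    have hout'get : ∀ k < n, out'.getD k missing =
        (if out.getD k missing = missing then line.getD k missing else out.getD k missing) := by
      intro k hk
      rw [hout', PySem.List.getD_map_range _ _ _ _ (by omega)]
    have hfold := pv_foldB rest out' (by simp [hout', hn])
      (fun l hl => hrl l (by simp [hl]))
      (fun k hk l hl h1 h2 => by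
        rw [hout'get k hk] at h1 ⊢
        by_cases ho : out.getD k missing = missing
        · rw [if_pos ho] at h1 ⊢
          exact hcc k hk line (by simp) l (by simp [hl]) h1 h2
        · rw [if_neg ho] at h1 ⊢
          exact hco k hk l (by simp [hl]) ho h2)
      (fun k hk l1 h1 l2 h2 => hcc k hk l1 (by simp [h1]) l2 (by simp [h2]))
    rw [hfold]
    congr 1
    apply List.map_congr_left
    intro k hk
    have hkn : k < n := by simpa using hk
    have hcol : pvColv (line :: rest) missing k =
        (if line.getD k missing = missing then pvColv rest missing k else line.getD k missing) := by
      simp only [pvColv, List.map_cons, List.filter_cons]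
      by_cases h : line.getD k missing = missing
      · rw [if_neg (by simpa using h), if_pos h]
      · rw [if_pos (by simpa using h), if_neg h]
        rfl
    rw [hout'get k hkn, hcol]
    by_cases h1 : List.getD out k missing = missing
    · by_cases h2 : List.getD line k missing = missing
      · simp only [List.getD_eq_getElem?_getD] at h1 h2 ⊢
        simp [h1, h2]
      · simp only [List.getD_eq_getElem?_getD] at h1 h2 ⊢
        simp [h1, h2]
    · simp only [List.getD_eq_getElem?_getD] at h1 ⊢
      simp [h1]

-- ===== VERDICT (by name: the statement is the Claim_ definition above) =====
theorem consensus_pattern_spec : Claim_equal_consensus_pattern := by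
  intro patterns missing _ hpre
  obtain ⟨hne, hlen, hcomp⟩ := hpre
  match patterns, hne with
  | p0 :: rest, _ =>
    have hhead : (p0 :: rest).headD [] = p0 := rfl
    rw [hhead] at hlen hcomp
    unfold Spec_consensus_pattern consensus_pattern consensus_pattern_alt
    rw [PySem.List.pyGet?_zero_cons]
    dsimp only
    have hA := pv_loopA (patterns := p0 :: rest) (missing := missing)
      (PySem.List.pyRange 0 (Int.ofNat p0.length) 1) []
      (fun i hi => by
        rw [show (Int.ofNat p0.length : Int) = ((p0.length : Nat) : Int) from rfl] at hi
        rw [PySem.List.pyRange_zero_natCast] at hi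
        obtain ⟨k, hk, rfl⟩ := List.mem_map.mp hi
        have hk' : k < p0.length := List.mem_range.mp hk
        exact ⟨by omega, fun l hl => by
          have := hlen l hl
          simp only [Int.toNat_natCast]
          omega⟩)
      (fun i hi => by
        rw [show (Int.ofNat p0.length : Int) = ((p0.length : Nat) : Int) from rfl] at hi
        rw [PySem.List.pyRange_zero_natCast] at hi
        obtain ⟨k, hk, rfl⟩ := List.mem_map.mp hi
        have hk' : k < p0.length := List.mem_range.mp hk
        simpa using hcomp k hk')
    have hB := pv_foldB (missing := missing) (n := p0.length) (p0 :: rest)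
      (List.replicate p0.length missing) (by simp)
      hlen
      (fun k hk l hl h1 h2 => by
        exfalso; exact h1 (List.getD_replicate _ hk))
      hcomp
    rw [hA, hB]
    simp only [Option.getD_some, List.nil_append]
    rw [show (Int.ofNat p0.length : Int) = ((p0.length : Nat) : Int) from rfl,
      PySem.List.pyRange_zero_natCast, List.map_map]
    apply List.map_congr_left
    intro k hk
    simp [Function.comp]
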